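-- pv_equiv track=rewrite | github.com/LucaJones26/MidTermExam1 | Q5.py | count_pattern_occurrences
-- ===== SOURCE A (Python) =====
-- def count_pattern_occurrences(text):
--     count = 0
--     start_index = 0
--
--     while start_index < len(text):
--
--         start_index = text.find('b', start_index)
--
--         if start_index == -1:
--             break
--
--
--         for end_index in range(start_index + 3, len(text) + 1):
--             if text[end_index - 3:end_index] == "Bob":  # Check if last 3 letters are 'Bob'
--                 count += 1  # Found a valid pattern
--                 break  # Move to the next 'b'
--
--         start_index += 1
--
--     return count
-- ===== SOURCE B (Python) =====
-- def count_pattern_occurrences(text):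
--     last = text.rfind("Bob")
--     if last == -1:
--         return 0
--     return text[:last + 1].count("b")
-- ===== Notes on version B (the rewrite author's own statement) =====
-- stated objective: faster
-- what changed: A re-scans forward for a 'Bob' window after every lowercase 'b' it finds; B locates the last 'Bob' occurrence once with rfind and counts the 'b' characters up to it in a single pass.
import Mathlib
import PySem

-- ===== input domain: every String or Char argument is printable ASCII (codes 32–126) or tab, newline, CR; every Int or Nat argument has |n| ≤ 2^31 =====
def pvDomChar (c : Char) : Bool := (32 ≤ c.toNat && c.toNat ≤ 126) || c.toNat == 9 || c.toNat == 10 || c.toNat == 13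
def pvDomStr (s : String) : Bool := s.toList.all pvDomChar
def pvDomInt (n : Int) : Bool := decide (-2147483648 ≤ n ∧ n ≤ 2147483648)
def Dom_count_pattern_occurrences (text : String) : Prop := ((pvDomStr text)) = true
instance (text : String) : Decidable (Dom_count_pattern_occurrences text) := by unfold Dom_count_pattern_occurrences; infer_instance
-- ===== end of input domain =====

-- B replaces A's quadratic rescan (a forward 'Bob' search after every 'b') by one rfind of
-- the last 'Bob' plus one count of 'b' in the prefix up to it (faster in a timing run).

-- ===== PORT A =====

-- inner `for end_index in range(start_index+3, len(text)+1): if text[end_index-3:end_index] == "Bob": count += 1; break`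
def pvInnerA (cs : List Char) (count : Int) (e : Nat) : Int :=
  if e < cs.length + 1 then
    if PySem.List.slice cs (some ((e : Int) - 3)) (some (e : Int)) = ['B', 'o', 'b'] then
      count + 1
    else
      pvInnerA cs count (e + 1)
  else count
termination_by cs.length + 1 - e

-- outer `while start_index < len(text): start_index = text.find('b', start_index); …; start_index += 1`
def pvOuterA (cs : List Char) (count : Int) (start : Nat) : Int :=
  if h : start < cs.length then
    let f := PySem.Chars.findFrom cs ['b'] (start : Int) none
    if hf : f = -1 then count
    else pvOuterA cs (pvInnerA cs count (f.toNat + 3)) (f.toNat + 1)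
  else count
termination_by cs.length - start
decreasing_by
  have hspec := PySem.Chars.findFrom_natCast_spec cs ['b'] start (by omega) hf
  have : (start : Int) ≤ PySem.Chars.findFrom cs ['b'] (start : Int) none := hspec.1
  omega

def count_pattern_occurrences (text : String) : Int :=
  pvOuterA text.toList 0 0

-- ===== PORT B =====

def count_pattern_occurrences_alt (text : String) : Int :=
  let cs := text.toList
  let last := PySem.Chars.rfind cs ['B', 'o', 'b']     -- text.rfind("Bob")
  if last = -1 then 0
  else (PySem.Chars.count (PySem.List.slice cs none (some (last + 1))) ['b'] : Int)  -- text[:last+1].count("b")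

-- ===== PRECONDITION & SPEC =====
def Spec_count_pattern_occurrences (text : String) (out : Int) : Prop := out = count_pattern_occurrences_alt text
instance (text : String) (out : Int) : Decidable (Spec_count_pattern_occurrences text out) := by unfold Spec_count_pattern_occurrences; infer_instance

-- ===== CLAIM (what is proved, stated in full; the proofs are below) =====
def Claim_equal_count_pattern_occurrences : Prop := ∀ (text : String), Dom_count_pattern_occurrences text → Spec_count_pattern_occurrences text (count_pattern_occurrences text)

-- ===== LEMMAS AND PROOFS =====

-- a "Bob" occurrence starts at index j (this forces j + 3 ≤ cs.length)
def pvBobAt (cs : List Char) (j : Nat) : Bool :=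
  ['B', 'o', 'b'].isPrefixOf (cs.drop j)

-- some "Bob" occurrence starts at an index ≥ i
def pvHasBob (cs : List Char) (i : Nat) : Bool :=
  (List.range cs.length).any (fun j => decide (i ≤ j) && pvBobAt cs j)

-- index i counts towards the answer iff text[i] = 'b' and some "Bob" occurrence starts at j ≥ i
def pvCondB (cs : List Char) (i : Nat) : Bool :=
  (cs[i]? == some 'b') && pvHasBob cs i

def pvM (cs : List Char) (s : Nat) : Nat :=
  (List.range' s (cs.length - s)).countP (fun i => pvCondB cs i)

theorem pvBobAt_le {cs : List Char} {j : Nat} (h : pvBobAt cs j = true) :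
    j + 3 ≤ cs.length := by
  rw [pvBobAt, List.isPrefixOf_iff_prefix] at h
  have := h.length_le
  simp [List.length_drop] at this
  omega

theorem pvHasBob_iff (cs : List Char) (i : Nat) :
    pvHasBob cs i = true ↔ ∃ j, i ≤ j ∧ pvBobAt cs j = true := by
  rw [pvHasBob, List.any_eq_true]
  constructor
  · rintro ⟨j, -, hj⟩
    simp only [Bool.and_eq_true, decide_eq_true_eq] at hj
    exact ⟨j, hj.1, hj.2⟩
  · rintro ⟨j, hij, hb⟩
    refine ⟨j, List.mem_range.2 ?_, ?_⟩
    · have := pvBobAt_le hb; omega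
    · simp [hij, hb]

theorem singleton_prefix_iff (cs : List Char) (i : Nat) (c : Char) :
    (([c] : List Char) <+: cs.drop i) ↔ cs[i]? = some c := by
  rw [← List.head?_drop]
  cases cs.drop i with
  | nil => simp
  | cons a t => simp [List.cons_prefix_cons, eq_comm]

theorem pvBobAt_iff_take (cs : List Char) (m : Nat) :
    pvBobAt cs m = true ↔ (cs.drop m).take 3 = ['B', 'o', 'b'] := by
  rw [pvBobAt, List.isPrefixOf_iff_prefix, List.prefix_iff_eq_take]
  simp [eq_comm]

theorem pvHasBob_succ {cs : List Char} {m : Nat} (h : pvBobAt cs m = false) :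
    pvHasBob cs m = pvHasBob cs (m + 1) := by
  rcases Bool.eq_false_or_eq_true (pvHasBob cs (m + 1)) with h1 | h1
  · rw [h1]
    obtain ⟨j, hij, hb⟩ := (pvHasBob_iff cs (m + 1)).1 h1
    exact (pvHasBob_iff cs m).2 ⟨j, by omega, hb⟩
  · rw [h1, Bool.eq_false_iff]
    intro h2
    obtain ⟨j, hij, hb⟩ := (pvHasBob_iff cs m).1 h2
    rcases Nat.eq_or_lt_of_le hij with rfl | hlt
    · rw [hb] at h; exact Bool.noConfusion h
    · exact Bool.eq_false_iff.1 h1 ((pvHasBob_iff cs (m + 1)).2 ⟨j, hlt, hb⟩)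


theorem pvInnerA_spec (cs : List Char) (count : Int) (m : Nat) :
    pvInnerA cs count (m + 3) = if pvHasBob cs m then count + 1 else count := by
  have key : ∀ k m, cs.length + 1 - (m + 3) ≤ k →
      pvInnerA cs count (m + 3) = if pvHasBob cs m then count + 1 else count := by
    intro k
    induction k with
    | zero =>
      intro m hm
      rw [pvInnerA]
      have hguard : ¬ (m + 3 < cs.length + 1) := by omega
      rw [if_neg hguard]
      have : pvHasBob cs m = false := by
        rw [Bool.eq_false_iff]
        intro h
        obtain ⟨j, hij, hb⟩ := (pvHasBob_iff cs m).1 h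
        have := pvBobAt_le hb
        omega
      rw [this]
      simp
    | succ k ih =>
      intro m hm
      rw [pvInnerA]
      by_cases hguard : m + 3 < cs.length + 1
      · rw [if_pos hguard]
        rw [show ((m + 3 : Nat) : Int) - 3 = ((m : Nat) : Int) by push_cast; ring,
          PySem.List.slice_natCast, show m + 3 - m = 3 by omega]
        by_cases hbob : (cs.drop m).take 3 = ['B', 'o', 'b']
        · rw [if_pos hbob]
          have : pvHasBob cs m = true :=
            (pvHasBob_iff cs m).2 ⟨m, le_refl m, (pvBobAt_iff_take cs m).2 hbob⟩
          rw [this]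
          simp
        · rw [if_neg hbob]
          have hstep : pvInnerA cs count (m + 3 + 1) = pvInnerA cs count ((m + 1) + 3) := by
            norm_num
          rw [hstep, ih (m + 1) (by omega),
            pvHasBob_succ (Bool.eq_false_iff.2 (fun h => hbob ((pvBobAt_iff_take cs m).1 h)))]
      · rw [if_neg hguard]
        have : pvHasBob cs m = false := by
          rw [Bool.eq_false_iff]
          intro h
          obtain ⟨j, hij, hb⟩ := (pvHasBob_iff cs m).1 h
          have := pvBobAt_le hb
          omega
        rw [this]
        simp
  exact key (cs.length + 1) m (by omega)

theorem pvMemDrop_iff (cs : List Char) (s : Nat) (x : Char) :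
    x ∈ cs.drop s ↔ ∃ i, s ≤ i ∧ cs[i]? = some x := by
  rw [List.mem_iff_getElem?]
  constructor
  · rintro ⟨i, hi⟩
    rw [List.getElem?_drop] at hi
    exact ⟨s + i, by omega, hi⟩
  · rintro ⟨i, hsi, hi⟩
    exact ⟨i - s, by rw [List.getElem?_drop, show s + (i - s) = i by omega]; exact hi⟩

theorem pvM_split (cs : List Char) {s F : Nat} (h1 : s ≤ F) (h2 : F < cs.length) :
    pvM cs s = (List.range' s (F - s)).countP (fun i => pvCondB cs i)
      + (if pvCondB cs F then 1 else 0) + pvM cs (F + 1) := by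
  unfold pvM
  rw [show cs.length - s = (F - s) + ((cs.length - (F + 1)) + 1) by omega,
    ← List.range'_append_1, List.countP_append, show s + (F - s) = F by omega,
    List.range'_succ, List.countP_cons]
  by_cases hc : pvCondB cs F
  · simp [hc]; omega
  · simp [hc]

theorem pvM_eq_zero_of_no_b (cs : List Char) (s : Nat)
    (h : ∀ i, s ≤ i → cs[i]? ≠ some 'b') : pvM cs s = 0 := by
  unfold pvM
  rw [List.countP_eq_zero]
  intro i hi
  have hsi : s ≤ i := (List.mem_range'_1.1 hi).1
  intro hx
  rw [pvCondB, Bool.and_eq_true] at hx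
  exact h i hsi (by simpa using hx.1)

theorem pvOuterA_spec (cs : List Char) (count : Int) (s : Nat) :
    pvOuterA cs count s = count + (pvM cs s : Int) := by
  have key : ∀ k s, cs.length - s ≤ k → ∀ count : Int,
      pvOuterA cs count s = count + (pvM cs s : Int) := by
    intro k
    induction k with
    | zero =>
      intro s hs count
      rw [pvOuterA, dif_neg (by omega : ¬ s < cs.length)]
      simp [pvM, show cs.length - s = 0 by omega]
    | succ k ih =>
      intro s hs count
      by_cases h : s < cs.length
      · rw [pvOuterA, dif_pos h]
        show (if _hf : PySem.Chars.findFrom cs ['b'] (s : Int) none = -1 then count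
          else pvOuterA cs
            (pvInnerA cs count ((PySem.Chars.findFrom cs ['b'] (s : Int) none).toNat + 3))
            ((PySem.Chars.findFrom cs ['b'] (s : Int) none).toNat + 1)) = count + (pvM cs s : Int)
        by_cases hf : PySem.Chars.findFrom cs ['b'] (s : Int) none = -1
        · rw [dif_pos hf]
          have hno : ¬ (['b'] : List Char) <:+: cs.drop s :=
            (PySem.Chars.findFrom_natCast_eq_neg_one_iff cs ['b'] s (by omega)).1 hf
          rw [List.singleton_infix_iff, pvMemDrop_iff] at hno
          push Not at hno
          rw [pvM_eq_zero_of_no_b cs s (fun i hi => hno i hi)]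
          simp
        · rw [dif_neg hf]
          obtain ⟨hge, hpre, hmin⟩ :=
            PySem.Chars.findFrom_natCast_spec cs ['b'] s (by omega) hf
          set F := (PySem.Chars.findFrom cs ['b'] (s : Int) none).toNat with hFdef
          have hsF : s ≤ F := by omega
          have hFb : cs[F]? = some 'b' := (singleton_prefix_iff cs F 'b').1 hpre
          have hFlt : F < cs.length := (List.getElem?_eq_some_iff.1 hFb).1
          rw [ih (F + 1) (by omega), pvInnerA_spec]
          rw [pvM_split cs hsF hFlt]
          have hzero : (List.range' s (F - s)).countP (fun i => pvCondB cs i) = 0 := by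
            rw [List.countP_eq_zero]
            intro i hi
            have hmem := List.mem_range'_1.1 hi
            have : ¬ (['b'] : List Char) <+: cs.drop i := hmin i hmem.1 (by omega)
            rw [singleton_prefix_iff] at this
            intro hx
            rw [pvCondB, Bool.and_eq_true] at hx
            exact this (by simpa using hx.1)
          have hcF : pvCondB cs F = pvHasBob cs F := by
            rw [pvCondB, hFb]
            simp
          rw [hzero, hcF]
          by_cases hh : pvHasBob cs F
          · simp [hh]; ring
          · simp [hh]
      · rw [pvOuterA, dif_neg h]
        simp [pvM, show cs.length - s = 0 by omega]
  exact key (cs.length) s (by omega) count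

theorem pvRfindGo_spec (cs sub : List Char) : ∀ j : Nat,
    (PySem.Chars.rfind.go cs sub j = -1 ∧ ∀ k, k ≤ j → sub.isPrefixOf (cs.drop k) = false) ∨
    (∃ L, L ≤ j ∧ PySem.Chars.rfind.go cs sub j = (L : Int) ∧
      sub.isPrefixOf (cs.drop L) = true ∧
      ∀ k, L < k → k ≤ j → sub.isPrefixOf (cs.drop k) = false) := by
  intro j
  induction j with
  | zero =>
    rw [PySem.Chars.rfind.go.eq_def]
    by_cases h : sub.isPrefixOf cs = true
    · right
      refine ⟨0, le_refl 0, by simp [h], by simpa using h, fun k hk1 hk2 => by omega⟩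
    · left
      refine ⟨by simp [h], fun k hk => ?_⟩
      interval_cases k
      simpa using Bool.eq_false_iff.2 h
  | succ j ih =>
    rw [PySem.Chars.rfind.go.eq_def]
    by_cases h : sub.isPrefixOf (cs.drop (j + 1)) = true
    · right
      exact ⟨j + 1, le_refl _, by simp [h], h, fun k hk1 hk2 => by omega⟩
    · rcases ih with ⟨h1, h2⟩ | ⟨L, hL1, hL2, hL3, hL4⟩
      · left
        refine ⟨by simp [h, h1], fun k hk => ?_⟩
        rcases Nat.lt_or_ge k (j + 1) with hk' | hk'
        · exact h2 k (by omega)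
        · rw [show k = j + 1 by omega]; exact Bool.eq_false_iff.2 h
      · right
        refine ⟨L, by omega, by simp [h, hL2], hL3, fun k hk1 hk2 => ?_⟩
        rcases Nat.lt_or_ge k (j + 1) with hk' | hk'
        · exact hL4 k hk1 (by omega)
        · rw [show k = j + 1 by omega]; exact Bool.eq_false_iff.2 h

theorem pvBobAt_of_ge_len {cs : List Char} {k : Nat} (h : cs.length ≤ k) :
    pvBobAt cs k = false := by
  rw [pvBobAt, List.drop_eq_nil_of_le h]
  rfl

-- rfind's result characterised: -1 ↔ no "Bob" anywhere; otherwise the LAST occurrence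
theorem pvRfind_spec (cs : List Char) :
    (PySem.Chars.rfind cs ['B', 'o', 'b'] = -1 ∧ ∀ k, pvBobAt cs k = false) ∨
    (∃ L : Nat, PySem.Chars.rfind cs ['B', 'o', 'b'] = (L : Int) ∧
      pvBobAt cs L = true ∧ ∀ k, L < k → pvBobAt cs k = false) := by
  rw [PySem.Chars.rfind]
  rcases pvRfindGo_spec cs ['B', 'o', 'b'] cs.length with ⟨h1, h2⟩ | ⟨L, hL1, hL2, hL3, hL4⟩
  · left
    refine ⟨h1, fun k => ?_⟩
    rcases Nat.lt_or_ge cs.length k with hk | hk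
    · exact pvBobAt_of_ge_len (by omega)
    · exact h2 k hk
  · right
    refine ⟨L, hL2, hL3, fun k hk => ?_⟩
    rcases Nat.lt_or_ge cs.length k with hk' | hk'
    · exact pvBobAt_of_ge_len (by omega)
    · exact hL4 k hk hk'

theorem pvHasBob_of_last (cs : List Char) {L : Nat}
    (hL : pvBobAt cs L = true) (hmax : ∀ k, L < k → pvBobAt cs k = false) (i : Nat) :
    pvHasBob cs i = decide (i ≤ L) := by
  by_cases hi : i ≤ L
  · rw [(pvHasBob_iff cs i).2 ⟨L, hi, hL⟩]
    simp [hi]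
  · have : pvHasBob cs i = false := by
      rw [Bool.eq_false_iff]
      intro hcon
      obtain ⟨j, hij, hb⟩ := (pvHasBob_iff cs i).1 hcon
      rw [hmax j (by omega)] at hb
      exact Bool.noConfusion hb
    rw [this]
    simp [hi]

theorem pvCountGo_single (c : Char) : ∀ (l : List Char) (fuel acc : Nat),
    l.length ≤ fuel → PySem.Chars.count.go [c] fuel l acc = acc + l.count c := by
  intro l
  induction l with
  | nil =>
    intro fuel acc _
    rw [PySem.Chars.count.go.eq_def]
    cases fuel <;> simp
  | cons h t ih =>
    intro fuel acc hlen
    obtain ⟨f, rfl⟩ : ∃ f, fuel = f + 1 := ⟨fuel - 1, by simp at hlen; omega⟩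
    rw [PySem.Chars.count.go.eq_def]
    simp only [List.isPrefixOf, Bool.and_true]
    by_cases hc : c = h
    · rw [if_pos (by simp [hc])]
      rw [show List.drop ([c] : List Char).length (h :: t) = t by simp,
        ih f (acc + 1) (by simp at hlen; omega), List.count_cons]
      simp [hc]
      omega
    · rw [if_neg (by simp [hc])]
      rw [ih f acc (by simp at hlen; omega), List.count_cons]
      simp
      exact fun h' => hc h'.symm

theorem pvCount_single (l : List Char) (c : Char) :
    PySem.Chars.count l [c] = l.count c := by
  rw [PySem.Chars.count]
  rw [if_neg (by simp)]
  simpa using pvCountGo_single c l l.length 0 (le_refl _)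

theorem pvCountP_range_take (cs : List Char) : ∀ t : Nat, t ≤ cs.length →
    (List.range t).countP (fun i => cs[i]? == some 'b') = (cs.take t).count 'b' := by
  intro t
  induction t with
  | zero => simp
  | succ t ih =>
    intro ht
    rw [List.range_succ, List.countP_append, List.take_add_one, List.count_append, ih (by omega)]
    have hget : cs[t]? = some cs[t] := List.getElem?_eq_getElem (by omega)
    rw [hget]
    simp only [List.countP_cons, List.countP_nil, Option.toList_some]
    by_cases hb : cs[t] = 'b' <;> simp [hb, hget]

theorem pvM_eq_alt (cs : List Char) :
    (pvM cs 0 : Int) =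
      (if PySem.Chars.rfind cs ['B', 'o', 'b'] = -1 then 0
       else (PySem.Chars.count
         (PySem.List.slice cs none (some (PySem.Chars.rfind cs ['B', 'o', 'b'] + 1))) ['b'] : Int)) := by
  rcases pvRfind_spec cs with ⟨h1, h2⟩ | ⟨L, hL1, hL2, hL3⟩
  · have hM : pvM cs 0 = 0 := by
      unfold pvM
      rw [List.countP_eq_zero]
      intro i _ hx
      rw [pvCondB, Bool.and_eq_true] at hx
      have : pvHasBob cs i = false := by
        rw [Bool.eq_false_iff]
        intro hcon
        obtain ⟨j, -, hb⟩ := (pvHasBob_iff cs i).1 hcon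
        rw [h2 j] at hb
        exact Bool.noConfusion hb
      rw [this] at hx
      exact Bool.noConfusion hx.2
    rw [hM, if_pos h1]
    simp
  · have hLn : L + 3 ≤ cs.length := pvBobAt_le hL2
    rw [if_neg (by rw [hL1]; omega), hL1,
      show ((L : Int) + 1) = ((L + 1 : Nat) : Int) by push_cast; ring,
      PySem.List.slice_to_natCast, pvCount_single]
    have hfun : (fun i => pvCondB cs i) = (fun i => (cs[i]? == some 'b') && decide (i ≤ L)) := by
      funext i
      rw [pvCondB, pvHasBob_of_last cs hL2 hL3 i]
    have hsplit : List.range cs.length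
        = List.range (L + 1) ++ List.range' (L + 1) (cs.length - (L + 1)) := by
      calc List.range cs.length
          = List.range ((L + 1) + (cs.length - (L + 1))) := by
            rw [show (L + 1) + (cs.length - (L + 1)) = cs.length by omega]
        _ = List.range (L + 1) ++ List.range' (L + 1) (cs.length - (L + 1)) := by
            rw [List.range_eq_range', List.range_eq_range', ← List.range'_append_1]
            norm_num
    have hM : pvM cs 0 = (cs.take (L + 1)).count 'b' := by
      unfold pvM
      rw [Nat.sub_zero, ← List.range_eq_range', hfun, hsplit, List.countP_append]
      have h0 : (List.range' (L + 1) (cs.length - (L + 1))).countP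
          (fun i => (cs[i]? == some 'b') && decide (i ≤ L)) = 0 := by
        rw [List.countP_eq_zero]
        intro i hi hx
        have := (List.mem_range'_1.1 hi).1
        rw [Bool.and_eq_true, decide_eq_true_eq] at hx
        omega
      have h1' : (List.range (L + 1)).countP (fun i => (cs[i]? == some 'b') && decide (i ≤ L))
          = (List.range (L + 1)).countP (fun i => cs[i]? == some 'b') := by
        apply List.countP_congr
        intro i hi
        have : i < L + 1 := List.mem_range.1 hi
        simp [show i ≤ L by omega]
      rw [h0, h1', pvCountP_range_take cs (L + 1) (by omega)]
      omega
    rw [hM]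

-- ===== VERDICT (by name: the statement is the Claim_ definition above) =====
theorem count_pattern_occurrences_spec : Claim_equal_count_pattern_occurrences := by
  intro text _
  unfold Spec_count_pattern_occurrences count_pattern_occurrences count_pattern_occurrences_alt
  rw [pvOuterA_spec, pvM_eq_alt]
  simp
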